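-- pv_equiv track=rewrite | github.com/elara7/Application-of-Topic-Model-in-Evolution-of-Financial-Texts | 4_seg/seg_ana/3_freq_kv.py | cal_line
-- ===== SOURCE A (Python) =====
-- def cal_line(line_all):
--     name = line_all[0]
--     line = line_all[1]
--     word_freq = {}
--     line = [i.split('_') for i in line.split()]
--     for i in line:
--         word = i[0]
--
--         if word in word_freq.keys():
--             word_freq[word] += 1
--         else:
--             word_freq[word] = 1
--     return [name,' '.join([str(x)+':'+str(y) for x,y in word_freq.items()])]
-- ===== SOURCE B (Python) =====
-- def cal_line(line_all):
--     name = line_all[0]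
--     words = [t.split('_')[0] for t in line_all[1].split()]
--
--     def freq(ws):
--         # recursive partition: head word, its total count, recurse on the rest
--         # with that word filtered out -> first-occurrence order, each word once
--         if not ws:
--             return []
--         w, rest = ws[0], ws[1:]
--         return [(w, 1 + rest.count(w))] + freq([x for x in rest if x != w])
--
--     return [name, ' '.join(x + ':' + str(c) for x, c in freq(words))]
-- ===== Notes on version B (the rewrite author's own statement) =====
-- stated objective: alternative
-- what changed: Replaces the dict-accumulation loop by a recursive partition with no dictionary: take the head word, count its remaining occurrences, filter it out and recurse on the shrunken list.
import Mathlib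
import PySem

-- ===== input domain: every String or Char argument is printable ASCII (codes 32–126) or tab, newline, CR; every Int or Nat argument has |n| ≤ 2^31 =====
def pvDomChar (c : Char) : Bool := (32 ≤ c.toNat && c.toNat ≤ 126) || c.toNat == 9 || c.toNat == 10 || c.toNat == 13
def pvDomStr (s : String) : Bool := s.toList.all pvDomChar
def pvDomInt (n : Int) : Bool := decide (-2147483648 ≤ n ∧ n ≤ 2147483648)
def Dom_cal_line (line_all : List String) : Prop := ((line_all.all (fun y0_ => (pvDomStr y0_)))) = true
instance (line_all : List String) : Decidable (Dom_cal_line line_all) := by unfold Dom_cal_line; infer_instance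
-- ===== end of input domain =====

-- B drops the counting dictionary entirely: a recursive partition (head word, count it in the tail, filter it out, recurse); same result, no speed claim.

-- ===== PORT A =====
def cal_line (line_all : List String) : List String :=
  let name := PySem.List.pyGetD line_all 0 ""
  let line := PySem.List.pyGetD line_all 1 ""
  let parts := (PySem.Str.split₀ line).map (fun i => (PySem.Str.split? i "_").getD [])
  let word_freq : PySem.Dict String Int :=
    parts.foldl (fun d i =>
      let word := PySem.List.pyGetD i 0 ""
      if d.contains word then d.insert word (d.getD word 0 + 1)
      else d.insert word 1) PySem.Dict.empty
  [name, PySem.Str.join " " (word_freq.items.map (fun p => p.1 ++ ":" ++ PySem.Int.toStr p.2))]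

-- ===== PORT B =====
-- recursive partition from Source B's freq helper
def pvFreqB (ws : List String) : List (String × Int) :=
  match ws with
  | [] => []
  | w :: rest =>
    (w, 1 + (rest.count w : Int)) :: pvFreqB (rest.filter (fun x => x ≠ w))
termination_by ws.length
decreasing_by
  have h := List.length_filter_le (fun x : {x // x ∈ rest} => !decide (↑x = w)) rest.attach
  simp only [List.length_attach] at h
  simpa using Nat.lt_succ_of_le h

def cal_line_alt (line_all : List String) : List String :=
  let name := PySem.List.pyGetD line_all 0 ""
  let words := (PySem.Str.split₀ (PySem.List.pyGetD line_all 1 "")).map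
      (fun t => PySem.List.pyGetD ((PySem.Str.split? t "_").getD []) 0 "")
  [name, PySem.Str.join " " ((pvFreqB words).map (fun p => p.1 ++ ":" ++ PySem.Int.toStr p.2))]

-- ===== PRECONDITION & SPEC =====
-- Pre_ excludes exactly the inputs (fewer than two elements) on which A raises IndexError at line_all[0]/line_all[1].
def Pre_cal_line (line_all : List String) : Prop := 2 ≤ line_all.length
instance (line_all : List String) : Decidable (Pre_cal_line line_all) := by unfold Pre_cal_line; infer_instance
def pvWitness_cal_line : List String := ["doc", "a_x b a"]
def Spec_cal_line (line_all : List String) (out : List String) : Prop := out = cal_line_alt line_all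
instance (line_all : List String) (out : List String) : Decidable (Spec_cal_line line_all out) := by unfold Spec_cal_line; infer_instance

-- ===== CLAIM (what is proved, stated in full; the proofs are below) =====
def Claim_equal_cal_line : Prop := ∀ (line_all : List String), Dom_cal_line line_all → Pre_cal_line line_all → Spec_cal_line line_all (cal_line line_all)

-- ===== LEMMAS AND PROOFS =====
theorem branch_eq (d : PySem.Dict String Int) (w : String) :
    (if d.contains w then d.insert w (d.getD w 0 + 1) else d.insert w 1) =
      d.insert w (d.getD w 0 + 1) := by
  by_cases h : d.contains w = true
  · simp [h]
  · simp only [Bool.not_eq_true] at h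
    rw [PySem.Dict.getD_of_not_contains d (0:Int) h]
    simp [h]

theorem freq_items_words (ws : List String) :
    (ws.foldl (fun (d : PySem.Dict String Int) w =>
        if d.contains w then d.insert w (d.getD w 0 + 1)
        else d.insert w 1) PySem.Dict.empty).items
      = (PySem.List.dedup ws).map (fun k => (k, (ws.count k : Int))) := by
  simp only [branch_eq]
  rw [PySem.Dict.foldl_insert_getD_add_one_eq_counter, PySem.Dict.items_counter,
    PySem.List.dedup_eq_ofList]

theorem ofList_update_of_mem {s : PySem.Set String} {x : String} (hx : x ∈ s)
    (xs : List String) :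
    PySem.Set.update s xs = PySem.Set.update s (xs.filter (fun y => y ≠ x)) := by
  induction xs generalizing s with
  | nil => rfl
  | cons y ys ih =>
    by_cases h : y = x
    · subst h
      have : PySem.Set.add s y = s := by
        simp [PySem.Set.add, PySem.Set.contains, hx]
      simp only [PySem.Set.update, List.foldl_cons, List.filter_cons] at *
      simp only [this]
      simpa [PySem.Set.update] using ih hx
    · have hy : x ∈ PySem.Set.add s y := by
        simp [PySem.Set.add, PySem.Set.contains]
        split <;> simp [hx]
      simp only [PySem.Set.update, List.foldl_cons, List.filter_cons, h,
        decide_true, ne_eq, not_false_eq_true] at *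
      simpa [PySem.Set.update] using ih hy

theorem update_cons_of_not_mem {x : String} (zs : List String) (s : List String)
    (hx : x ∉ zs) : PySem.Set.update (x :: s) zs = x :: PySem.Set.update s zs := by
  induction zs generalizing s with
  | nil => rfl
  | cons y ys ih =>
    have hyx : y ≠ x := fun h => hx (h ▸ List.mem_cons_self)
    have hadd : PySem.Set.add (x :: s) y = x :: PySem.Set.add s y := by
      simp [PySem.Set.add, PySem.Set.contains, hyx]
      split <;> simp
    simp only [PySem.Set.update, List.foldl_cons] at *
    rw [hadd]
    exact ih _ (fun h => hx (List.mem_cons_of_mem _ h))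

theorem dedup_cons_filter (w : String) (ws : List String) :
    PySem.List.dedup (w :: ws) = w :: PySem.List.dedup (ws.filter (fun y => y ≠ w)) := by
  have h0 : PySem.List.dedup (w :: ws) = PySem.Set.update [w] ws := by
    rfl
  have h1 : PySem.List.dedup (ws.filter (fun y => y ≠ w)) =
      PySem.Set.update [] (ws.filter (fun y => y ≠ w)) := rfl
  rw [h0, h1, ofList_update_of_mem (List.mem_singleton.mpr rfl) ws]
  exact update_cons_of_not_mem _ _ (by simp)

theorem pvFreqB_eq_aux (n : Nat) : ∀ (ws : List String), ws.length ≤ n →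
    pvFreqB ws = (PySem.List.dedup ws).map (fun k => (k, (ws.count k : Int))) := by
  induction n with
  | zero =>
    intro ws h
    have : ws = [] := List.eq_nil_of_length_eq_zero (Nat.le_zero.mp h)
    subst this
    rw [pvFreqB]; rfl
  | succ n ih =>
    intro ws h
    match ws with
    | [] => rw [pvFreqB]; rfl
    | w :: rest =>
      rw [pvFreqB, dedup_cons_filter, List.map_cons]
      have hlen : (rest.filter (fun x => x ≠ w)).length ≤ n :=
        le_trans (List.length_filter_le _ _) (by simpa using h)
      rw [ih _ hlen]
      congr 1
      · simp [List.count_cons_self]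
        ring
      · apply List.map_congr_left
        intro k hk
        have hkmem : k ∈ rest.filter (fun y => y ≠ w) := (PySem.List.mem_dedup _ _).mp hk
        have hkw : k ≠ w := by
          have := List.of_mem_filter hkmem
          simpa using this
        have hwk : ¬ w = k := fun hs => hkw hs.symm
        simp [List.count_filter, hkw, hwk]

theorem pvFreqB_eq_dedup_count (ws : List String) :
    pvFreqB ws = (PySem.List.dedup ws).map (fun k => (k, (ws.count k : Int))) :=
  pvFreqB_eq_aux ws.length ws le_rfl

-- ===== VERDICT (by name: the statement is the Claim_ definition above) =====
theorem cal_line_spec : Claim_equal_cal_line := by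
  intro line_all _ _
  unfold Spec_cal_line cal_line cal_line_alt
  simp only [List.foldl_map]
  rw [← List.foldl_map (f := fun t => PySem.List.pyGetD ((PySem.Str.split? t "_").getD []) 0 "")
      (g := fun (d : PySem.Dict String Int) word =>
        if d.contains word then d.insert word (d.getD word 0 + 1) else d.insert word 1)]
  rw [freq_items_words, pvFreqB_eq_dedup_count]
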